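-- pv_equiv track=rewrite | github.com/eZtaR1/ticktick-to-todoist | ticktick_to_todoist/converter.py | clean_label_name
-- ===== SOURCE A (Python) =====
-- def clean_label_name(name: str) -> str:
--     """Convert a string into a valid Todoist label."""
--     if not name:
--         return ""
--
--     # Replace spaces and dashes with underscore
--     cleaned = name.replace(' ', '_').replace('-', '_')
--
--     # Keep only alphanumeric, underscore and Nordic characters
--     cleaned = ''.join(c for c in cleaned if c.isalnum() or c == '_' or c in 'æøåÆØÅ')
--
--     # Ensure no double underscores
--     while '__' in cleaned:
--         cleaned = cleaned.replace('__', '_')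
--
--     # Remove any leading or trailing underscores
--     cleaned = cleaned.strip('_')
--
--     return cleaned.lower()
-- ===== SOURCE B (Python) =====
-- def clean_label_name(name: str) -> str:
--     """Convert a string into a valid Todoist label (single left-to-right pass)."""
--     if not name:
--         return ""
--     out = []
--     for c in name:
--         if c == ' ' or c == '-':
--             c = '_'
--         if not (c.isalnum() or c == '_' or c in 'æøåÆØÅ'):
--             continue
--         if c == '_' and out and out[-1] == '_':
--             continue
--         out.append(c)
--     return ''.join(out).strip('_').lower()
-- ===== Notes on version B (the rewrite author's own statement) =====
-- stated objective: alternative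
-- what changed: Replaces A's multi-pass pipeline (two replace passes, a filter pass, then a repeated whole-string replace('__','_') while-loop, then strip/lower) with a single left-to-right pass that maps ' '/'-' to '_', drops disallowed characters, and skips an underscore whenever the last appended character is already '_', followed by the same strip('_').lower().
import Mathlib
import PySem

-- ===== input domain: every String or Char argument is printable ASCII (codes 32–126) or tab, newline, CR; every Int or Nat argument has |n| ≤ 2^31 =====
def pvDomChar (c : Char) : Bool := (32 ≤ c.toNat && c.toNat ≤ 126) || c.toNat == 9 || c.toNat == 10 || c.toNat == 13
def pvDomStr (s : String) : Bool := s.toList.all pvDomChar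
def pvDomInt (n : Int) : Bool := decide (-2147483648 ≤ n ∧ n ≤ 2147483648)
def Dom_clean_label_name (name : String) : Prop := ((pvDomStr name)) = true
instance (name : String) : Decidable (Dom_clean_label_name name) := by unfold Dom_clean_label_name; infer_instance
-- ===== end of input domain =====

-- B fuses A's filter pass and its repeated "replace('__','_')" while-loop into one
-- left-to-right pass that skips an underscore when the last appended char is already '_'.

-- Shared character predicate (the same expression appears in both Pythons):
-- c.isalnum() or c == '_' or c in 'æøåÆØÅ'
def pvKeep (c : Char) : Bool :=
  PySem.Chars.isalnum c || c == '_' || ['æ','ø','å','Æ','Ø','Å'].contains c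

-- Reference recursion for Chars.replace with old = "__", new = "_" (used only to
-- establish the termination measure of A's while-loop and in the proofs below).
def pvRep2 : List Char → List Char
  | [] => []
  | [c] => [c]
  | c1 :: c2 :: t => if c1 = '_' ∧ c2 = '_' then '_' :: pvRep2 t else c1 :: pvRep2 (c2 :: t)

theorem pvRep2_go (fuel : Nat) : ∀ (l acc : List Char), l.length ≤ fuel →
    PySem.Chars.replace.go ['_','_'] ['_'] fuel l acc = acc.reverse ++ pvRep2 l := by
  induction fuel with
  | zero =>
    intro l acc h
    have : l = [] := List.eq_nil_of_length_eq_zero (Nat.le_zero.mp h)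
    subst this
    simp [PySem.Chars.replace.go, pvRep2]
  | succ n ih =>
    intro l acc h
    match l with
    | [] => simp [PySem.Chars.replace.go, pvRep2]
    | [c] =>
      rw [PySem.Chars.replace.go]
      have hc : List.isPrefixOf ['_','_'] [c] = false := by
        simp [List.isPrefixOf]
      rw [if_neg (by simp [hc])]
      rw [ih [] _ (by simp)]
      simp [pvRep2]
    | c1 :: c2 :: t =>
      rw [PySem.Chars.replace.go]
      by_cases hp : c1 = '_' ∧ c2 = '_'
      · obtain ⟨h1, h2⟩ := hp
        subst h1; subst h2
        rw [if_pos (by simp [List.isPrefixOf])]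
        rw [show List.drop ['_','_'].length ('_' :: '_' :: t) = t from rfl]
        rw [ih t _ (by simp at h; omega)]
        rw [show pvRep2 ('_' :: '_' :: t) = '_' :: pvRep2 t from by
          rw [pvRep2]; simp]
        simp
      · rw [if_neg (by simp [List.isPrefixOf]; intro h1 h2; exact hp ⟨h1.symm, h2.symm⟩)]
        rw [ih (c2 :: t) _ (by simp at h ⊢; omega)]
        rw [show pvRep2 (c1 :: c2 :: t) = c1 :: pvRep2 (c2 :: t) from by
          rw [pvRep2]; simp [hp]]
        simp

theorem pvReplace_uu (l : List Char) :
    PySem.Chars.replace l ['_','_'] ['_'] = pvRep2 l := by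
  rw [PySem.Chars.replace]
  simp [pvRep2_go l.length l [] (le_refl _)]

theorem pvRep2_length_le (l : List Char) : (pvRep2 l).length ≤ l.length := by
  fun_induction pvRep2 l <;> (simp_all; all_goals omega)

theorem pvRep2_length_lt (l : List Char) (h : ['_','_'] <:+: l) :
    (pvRep2 l).length < l.length := by
  fun_induction pvRep2 l with
  | case1 => simp at h
  | case2 c =>
    exfalso
    obtain ⟨u, v, huv⟩ := h
    rcases u with _ | ⟨a, u⟩ <;> simp_all
  | case3 c1 c2 t hp ih =>
    have := pvRep2_length_le t; simp; omega
  | case4 c1 c2 t hp ih =>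
    simp only [List.length_cons]
    rcases List.infix_cons_iff.mp h with hpre | hi
    · exfalso
      obtain ⟨u, hu⟩ := hpre
      simp at hu
      exact hp ⟨hu.1.symm, hu.2.1.symm⟩
    · have := ih hi; simp at this ⊢; omega

theorem pvReplace_uu_length_lt (l : List Char) (h : PySem.Chars.isIn ['_','_'] l = true) :
    (PySem.Chars.replace l ['_','_'] ['_']).length < l.length := by
  rw [pvReplace_uu]
  exact pvRep2_length_lt l ((PySem.Chars.isIn_iff_infix _ _).mp h)

-- ===== PORT A =====
-- while '__' in cleaned: cleaned = cleaned.replace('__', '_')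
def pvCollapseLoop (s : String) : String :=
  if h_ : PySem.Str.isIn "__" s = true then
    pvCollapseLoop (PySem.Str.replace s "__" "_")
  else s
termination_by s.toList.length
decreasing_by
  rw [PySem.Str.toList_replace]
  exact pvReplace_uu_length_lt s.toList (by
    have := (PySem.Str.isIn_iff_infix "__" s).mp h_
    exact (PySem.Chars.isIn_iff_infix _ _).mpr this)

def clean_label_name (name : String) : String :=
  if name = "" then ""
  else
    let c1 := PySem.Str.replace (PySem.Str.replace name " " "_") "-" "_"
    let c2 := String.ofList (c1.toList.filter (fun c => pvKeep c))
    let c3 := pvCollapseLoop c2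
    let c4 := PySem.Str.stripChars c3 "_"
    PySem.Str.lower c4

-- ===== PORT B =====
def clean_label_name_alt (name : String) : String :=
  if name = "" then ""
  else
    let out := name.toList.foldl (fun acc c =>
      let c' := if c == ' ' || c == '-' then '_' else c
      if !pvKeep c' then acc
      else if c' == '_' && acc.getLast? == some '_' then acc
      else acc ++ [c']) []
    PySem.Str.lower (PySem.Str.stripChars (String.ofList out) "_")

-- ===== PRECONDITION & SPEC =====
def Spec_clean_label_name (name : String) (out : String) : Prop := out = clean_label_name_alt name
instance (name : String) (out : String) : Decidable (Spec_clean_label_name name out) := by unfold Spec_clean_label_name; infer_instance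

-- ===== CLAIM (what is proved, stated in full; the proofs are below) =====
def Claim_equal_clean_label_name : Prop := ∀ (name : String), Dom_clean_label_name name → Spec_clean_label_name name (clean_label_name name)

-- ===== LEMMAS AND PROOFS =====

-- combined space/dash replacement
def pvRepl (c : Char) : Char := if c = ' ' ∨ c = '-' then '_' else c

theorem pvGo_single (a b : Char) (fuel : Nat) : ∀ (l acc : List Char), l.length ≤ fuel →
    PySem.Chars.replace.go [a] [b] fuel l acc
      = acc.reverse ++ l.map (fun c => if c = a then b else c) := by
  induction fuel with
  | zero =>
    intro l acc h
    have : l = [] := List.eq_nil_of_length_eq_zero (Nat.le_zero.mp h)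
    subst this
    simp [PySem.Chars.replace.go]
  | succ n ih =>
    intro l acc h
    match l with
    | [] => simp [PySem.Chars.replace.go]
    | c :: t =>
      rw [PySem.Chars.replace.go]
      by_cases hc : c = a
      · subst hc
        rw [if_pos (by simp [List.isPrefixOf])]
        rw [show List.drop [c].length (c :: t) = t from rfl]
        rw [ih t _ (by simp at h; omega)]
        simp
      · rw [if_neg (by simp [List.isPrefixOf]; intro h'; exact hc h'.symm)]
        rw [ih t _ (by simp at h; omega)]
        simp [hc]

theorem pvReplace_single (a b : Char) (l : List Char) :
    PySem.Chars.replace l [a] [b] = l.map (fun c => if c = a then b else c) := by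
  rw [PySem.Chars.replace]
  simp [pvGo_single a b l.length l [] (le_refl _)]

-- canonical underscore-collapsed form
def pvCanon : List Char → List Char
  | [] => []
  | [c] => [c]
  | c1 :: c2 :: t => if c1 = '_' ∧ c2 = '_' then pvCanon (c2 :: t) else c1 :: pvCanon (c2 :: t)

theorem pvCanon_cons (c : Char) (x : List Char) :
    pvCanon (c :: x) = if c = '_' ∧ x.head? = some '_' then pvCanon x else c :: pvCanon x := by
  rcases x with _ | ⟨c2, t⟩
  · simp [pvCanon]
  · rw [pvCanon]; simp

theorem pvCanon_of_not_infix (l : List Char) (h : ¬ ['_','_'] <:+: l) : pvCanon l = l := by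
  fun_induction pvCanon l with
  | case1 => rfl
  | case2 => rfl
  | case3 c1 c2 t hp ih =>
    exfalso
    exact h (List.infix_cons_iff.mpr (Or.inl ⟨t, by simp [hp.1, hp.2]⟩))
  | case4 c1 c2 t hp ih =>
    rw [ih (fun hi => h (List.infix_cons_iff.mpr (Or.inr hi)))]

theorem pvRep2_head (l : List Char) : (pvRep2 l).head? = l.head? := by
  fun_induction pvRep2 l with
  | case1 => rfl
  | case2 => rfl
  | case3 c1 c2 t hp ih => simp [hp.1]
  | case4 => simp

theorem pvCanon_rep2 (l : List Char) : pvCanon (pvRep2 l) = pvCanon l := by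
  fun_induction pvRep2 l with
  | case1 => rfl
  | case2 => rfl
  | case3 c1 c2 t hp ih =>
    obtain ⟨h1, h2⟩ := hp; subst h1; subst h2
    rw [pvCanon_cons '_' (pvRep2 t), pvRep2_head]
    rw [show pvCanon ('_' :: '_' :: t) = pvCanon ('_' :: t) from by rw [pvCanon]; simp]
    rw [pvCanon_cons '_' t]
    by_cases ht : t.head? = some '_'
    · simp [ht, ih]
    · simp [ht, ih]
  | case4 c1 c2 t hp ih =>
    rw [pvCanon_cons c1 (pvRep2 (c2 :: t)), pvRep2_head]
    rw [show pvCanon (c1 :: c2 :: t) = c1 :: pvCanon (c2 :: t) from by rw [pvCanon]; simp [hp]]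
    simp only [List.head?_cons]
    rw [if_neg (by simpa using hp)]
    rw [ih]

theorem pvCollapseLoop_eq_canon (s : String) :
    (pvCollapseLoop s).toList = pvCanon s.toList := by
  fun_induction pvCollapseLoop s with
  | case1 s hin ih =>
    rw [ih, PySem.Str.toList_replace]
    rw [show ("__" : String).toList = ['_','_'] from rfl,
        show ("_" : String).toList = ['_'] from rfl]
    rw [pvReplace_uu, pvCanon_rep2]
  | case2 s hin =>
    rw [pvCanon_of_not_infix]
    intro hi
    exact hin ((PySem.Str.isIn_iff_infix "__" s).mpr hi)

-- forward version of B's fold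
def pvFwd : Bool → List Char → List Char
  | _, [] => []
  | b, c :: t =>
    let c' := if c == ' ' || c == '-' then '_' else c
    if !pvKeep c' then pvFwd b t
    else if c' == '_' && b then pvFwd b t
    else c' :: pvFwd (c' == '_') t

theorem pvFoldl_eq_fwd (t : List Char) : ∀ (acc : List Char),
    t.foldl (fun acc c =>
      let c' := if c == ' ' || c == '-' then '_' else c
      if !pvKeep c' then acc
      else if c' == '_' && acc.getLast? == some '_' then acc
      else acc ++ [c']) acc = acc ++ pvFwd (acc.getLast? == some '_') t := by
  induction t with
  | nil => intro acc; simp [pvFwd]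
  | cons c t ih =>
    intro acc
    rw [List.foldl_cons, ih, pvFwd]
    show (if !pvKeep _ then acc else if _ && acc.getLast? == some '_' then acc else acc ++ _)
        ++ pvFwd ((if !pvKeep _ then acc
              else if _ && acc.getLast? == some '_' then acc else acc ++ _).getLast? == some '_') t
      = _
    by_cases hk : pvKeep (if c == ' ' || c == '-' then '_' else c) = true
    · rw [hk]
      simp only [Bool.not_true, Bool.false_eq_true, if_false]
      by_cases hd : ((if c == ' ' || c == '-' then '_' else c) == '_'
          && acc.getLast? == some '_') = true
      · rw [if_pos hd, if_pos hd]
      · rw [if_neg hd, if_neg hd]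
        rw [List.getLast?_append_cons, List.getLast?_singleton, List.append_assoc]
        rfl
    · simp only [Bool.not_eq_true] at hk
      rw [hk]
      simp

-- dedup on the already-filtered list
def pvG : Bool → List Char → List Char
  | _, [] => []
  | b, c :: t => if c == '_' then (if b then pvG true t else '_' :: pvG true t) else c :: pvG false t

theorem pvFwd_eq_g (b : Bool) (l : List Char) :
    pvFwd b l = pvG b ((l.map pvRepl).filter (fun c => pvKeep c)) := by
  induction l generalizing b with
  | nil => simp [pvFwd, pvG]
  | cons c t ih =>
    rw [pvFwd]
    have hrepl : (if c == ' ' || c == '-' then '_' else c) = pvRepl c := by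
      simp [pvRepl]
    rw [hrepl, List.map_cons, List.filter_cons]
    by_cases hk : pvKeep (pvRepl c) = true
    · simp only [hk, Bool.not_true, Bool.false_eq_true, if_false, if_true]
      rw [pvG]
      by_cases hu : (pvRepl c == '_') = true
      · have hu' : pvRepl c = '_' := by simpa using hu
        rw [hu']
        simp only [beq_self_eq_true, Bool.true_and, if_true]
        cases b with
        | true => simp [ih]
        | false => simp [ih]
      · simp only [hu, Bool.false_and, Bool.false_eq_true, if_false]
        simp [ih]
    · simp only [Bool.not_eq_true] at hk
      simp [hk, ih]

theorem pvG_canon (m : List Char) :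
    pvG false m = pvCanon m ∧ '_' :: pvG true m = pvCanon ('_' :: m) := by
  induction m with
  | nil => constructor <;> simp [pvG, pvCanon]
  | cons c t ih =>
    obtain ⟨ih1, ih2⟩ := ih
    constructor
    · rw [pvG, pvCanon_cons]
      by_cases hc : c = '_'
      · subst hc
        simp only [beq_self_eq_true, if_true, Bool.false_eq_true, if_false]
        rw [ih2, pvCanon_cons]
        simp
      · rw [if_neg (by simp [hc]), if_neg (by simp [hc]), ih1]
    · rw [pvG]
      rw [show pvCanon ('_' :: c :: t) = if c = '_' then pvCanon (c :: t) else '_' :: pvCanon (c :: t) from by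
        rw [pvCanon]; by_cases hc : c = '_' <;> simp [hc]]
      by_cases hc : c = '_'
      · subst hc; simp only [beq_self_eq_true, if_true]
        rw [ih2]
      · rw [if_neg (by simp [hc]), if_neg hc]
        rw [show pvCanon (c :: t) = if c = '_' ∧ t.head? = some '_' then pvCanon t else c :: pvCanon t from pvCanon_cons c t]
        rw [if_neg (by simp [hc]), ih1]

-- ===== VERDICT (by name: the statement is the Claim_ definition above) =====
theorem pvRepl_compose (c : Char) :
    (if (if c = ' ' then '_' else c) = '-' then '_' else (if c = ' ' then '_' else c)) = pvRepl c := by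
  by_cases h1 : c = ' ' <;> by_cases h2 : c = '-' <;> simp [pvRepl, h1, h2]

theorem clean_label_name_spec : Claim_equal_clean_label_name := by
  intro name _
  unfold Spec_clean_label_name clean_label_name clean_label_name_alt
  by_cases hn : name = ""
  · simp [hn]
  · simp only [hn, if_false]
    show PySem.Str.lower (PySem.Str.stripChars (pvCollapseLoop _) "_")
       = PySem.Str.lower (PySem.Str.stripChars (String.ofList _) "_")
    refine congrArg PySem.Str.lower (congrArg (fun s => PySem.Str.stripChars s "_") ?_)
    apply String.ext
    rw [String.toList_ofList, pvFoldl_eq_fwd name.toList []]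
    simp only [List.getLast?_nil, List.nil_append]
    rw [show ((none : Option Char) == some '_') = false from rfl]
    rw [pvFwd_eq_g, (pvG_canon _).1]
    rw [pvCollapseLoop_eq_canon, String.toList_ofList]
    refine congrArg pvCanon ?_
    rw [PySem.Str.toList_replace, PySem.Str.toList_replace]
    rw [show (" " : String).toList = [' '] from rfl, show ("-" : String).toList = ['-'] from rfl,
        show ("_" : String).toList = ['_'] from rfl]
    rw [pvReplace_single, pvReplace_single, List.map_map]
    refine congrArg (fun l => List.filter (fun c => pvKeep c) l) ?_
    refine List.map_congr_left fun c _ => ?_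
    simp only [Function.comp_apply]
    exact pvRepl_compose c
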